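-- pv_equiv track=rewrite | github.com/AveryS00/advent-of-code | 2020/day10/main.py | compute_combinations
-- ===== SOURCE A (Python) =====
-- from typing import List, Dict
-- from math import comb
--
-- def compute_diffs(adapters: List[int]) -> Dict[int, int]:
--     diffs = {}
--     for i in adapters[:-1]:
--         diffs[i] = -1
--         for j in range(1, 4):
--             if i + j in adapters:
--                 diffs[i] += 1
--     diffs[adapters[-1]] = 0
--     return diffs
--
-- def compute_combinations(totals: List[int], adapters: List[int]) -> int:
--     num_left = len(adapters) - totals[0] - totals[1] - totals[2]
--     combs = 0
--     for i in range(num_left + 1):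
--         combs += comb(num_left, i)
--
--     #  No
--     adapters.sort()
--     diffs = compute_diffs(adapters)
--     two_diffs = 0
--     for i in range(len((vals := list(diffs.values()))) - 1):
--         two_diffs += (vals[i] == 2)
--         two_diffs += (vals[i] == 1 and vals[i+1] == 1)
--     return combs * two_diffs
-- ===== SOURCE B (Python) =====
-- def compute_combinations(totals, adapters):
--     # NOTE: like A, this sorts `adapters` in place.
--     num_left = len(adapters) - totals[0] - totals[1] - totals[2]
--     combs = (1 << num_left) if num_left >= 0 else 0
--
--     adapters.sort()
--     # adjacent-dedup of the sorted list: the distinct adapter values in order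
--     keys = []
--     for a in adapters:
--         if not keys or keys[-1] != a:
--             keys.append(a)
--
--     # fused two-pointer sweep: j tracks the largest index with keys[j] <= keys[i] + 3,
--     # so v = j - i - 1 is the neighbour count minus one; the diff-pattern count is
--     # accumulated on the fly from (prev, v) pairs.
--     m = len(keys)
--     two_diffs = 0
--     prev = 0
--     j = 0
--     for i in range(m):
--         if i == m - 1:
--             v = 0
--         else:
--             while j + 1 < m and keys[j + 1] <= keys[i] + 3:
--                 j += 1
--             v = j - i - 1
--         if i > 0:
--             two_diffs += (prev == 2) + (prev == 1 and v == 1)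
--         prev = v
--     return combs * two_diffs
-- ===== Notes on version B (the rewrite author's own statement) =====
-- stated objective: faster
-- what changed: B drops the dict/membership machinery entirely: instead of summing binomials and testing 'i+j in adapters' for each key, it uses the closed form 2^num_left, adjacent-dedups the sorted list, and runs one fused two-pointer sweep over the distinct values (j tracks the furthest value within distance 3, v = j-i-1) accumulating the diff-pattern count on the fly.
import Mathlib
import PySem

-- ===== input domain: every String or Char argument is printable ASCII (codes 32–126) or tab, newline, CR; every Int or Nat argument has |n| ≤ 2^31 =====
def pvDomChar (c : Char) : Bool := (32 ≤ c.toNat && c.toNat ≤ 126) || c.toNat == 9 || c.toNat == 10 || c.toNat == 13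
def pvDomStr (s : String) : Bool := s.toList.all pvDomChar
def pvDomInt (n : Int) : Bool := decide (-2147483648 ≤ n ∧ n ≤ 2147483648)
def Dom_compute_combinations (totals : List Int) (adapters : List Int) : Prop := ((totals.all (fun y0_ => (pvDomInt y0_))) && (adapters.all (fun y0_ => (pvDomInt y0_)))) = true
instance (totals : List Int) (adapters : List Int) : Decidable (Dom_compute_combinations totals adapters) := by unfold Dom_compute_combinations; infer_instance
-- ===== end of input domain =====

-- B replaces the binomial sum by the closed form 2^num_left and the dict of per-key membership
-- tests by an adjacent dedup of the sorted list plus one fused two-pointer sweep (objective: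
-- faster). Like A, the Python B sorts `adapters` in place; the equivalence proved here is about
-- the return value.

-- ===== PORT A =====
def compute_diffs (adapters : List Int) : PySem.Dict Int Int :=
  let diffs : PySem.Dict Int Int :=
    (PySem.List.slice adapters none (some (-1))).foldl
      (fun diffs i =>
        (PySem.List.pyRange 1 4 1).foldl
          (fun diffs j =>
            if adapters.contains (i + j) then diffs.insert i (diffs.getD i 0 + 1) else diffs)
          (diffs.insert i (-1)))
      PySem.Dict.empty
  diffs.insert (PySem.List.pyGetD adapters (-1) 0) 0

def compute_combinations (totals : List Int) (adapters : List Int) : Int :=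
  let num_left : Int := (adapters.length : Int) - PySem.List.pyGetD totals 0 0
      - PySem.List.pyGetD totals 1 0 - PySem.List.pyGetD totals 2 0
  let combs : Int := (PySem.List.pyRange 0 (num_left + 1) 1).foldl
      (fun combs i => combs + (num_left.toNat.choose i.toNat : Int)) 0
  let sortedAdapters := PySem.List.sorted adapters (fun x => x)
  let diffs := compute_diffs sortedAdapters
  let vals := diffs.values
  let two_diffs : Int := (PySem.List.pyRange 0 ((vals.length : Int) - 1) 1).foldl
      (fun two_diffs i =>
        (two_diffs + (if PySem.List.pyGetD vals i 0 = 2 then 1 else 0))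
          + (if PySem.List.pyGetD vals i 0 = 1 ∧ PySem.List.pyGetD vals (i + 1) 0 = 1 then 1 else 0))
      0
  combs * two_diffs

-- ===== PORT B =====
-- Python's `keys` loop: adjacent dedup of the sorted list ("if not keys or keys[-1] != a: append")
def pvDedup (xs : List Int) : List Int :=
  xs.foldl (fun keys a => if keys.getLast? = some a then keys else keys ++ [a]) []

-- Python's inner `while j + 1 < m and keys[j + 1] <= keys[i] + 3: j += 1`
-- (keys.getD is exact for Python's keys[j + 1]: the index is always in range here)
def pvAdvance (keys : List Int) (bnd : Int) (j : Nat) : Nat :=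
  if j + 1 < keys.length ∧ keys.getD (j + 1) 0 ≤ bnd then pvAdvance keys bnd (j + 1) else j
termination_by keys.length - j
decreasing_by omega

def compute_combinations_alt (totals : List Int) (adapters : List Int) : Int :=
  let num_left : Int := (adapters.length : Int) - PySem.List.pyGetD totals 0 0
      - PySem.List.pyGetD totals 1 0 - PySem.List.pyGetD totals 2 0
  let combs : Int := if 0 ≤ num_left then (1 : Int) <<< num_left.toNat else 0
  let sortedAdapters := PySem.List.sorted adapters (fun x => x)
  let keys := pvDedup sortedAdapters
  let m := keys.length
  -- fold state = (two_diffs, prev, j); keys.getD i 0 is exact for Python's keys[i] (0 ≤ i < m)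
  let res : Int × Int × Nat := (List.range m).foldl
    (fun st i =>
      let jv : Nat × Int :=
        if i = m - 1 then (st.2.2, 0)
        else
          let j := pvAdvance keys (keys.getD i 0 + 3) st.2.2
          (j, (j : Int) - (i : Int) - 1)
      (if 0 < i then
          st.1 + (if st.2.1 = 2 then 1 else 0) + (if st.2.1 = 1 ∧ jv.2 = 1 then 1 else 0)
        else st.1,
       jv.2, jv.1))
    (0, 0, 0)
  combs * res.1

-- ===== PRECONDITION & SPEC =====
-- A raises IndexError when totals has fewer than 3 entries (totals[2]) or adapters is empty
-- (adapters[-1] in compute_diffs); Pre_ excludes exactly those inputs.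
def Pre_compute_combinations (totals : List Int) (adapters : List Int) : Prop :=
  3 ≤ totals.length ∧ adapters ≠ []
instance (totals : List Int) (adapters : List Int) : Decidable (Pre_compute_combinations totals adapters) := by unfold Pre_compute_combinations; infer_instance

def pvWitness_compute_combinations : List Int × List Int := ([1, 1, 1], [1, 2, 3])

def Spec_compute_combinations (totals : List Int) (adapters : List Int) (out : Int) : Prop := out = compute_combinations_alt totals adapters
instance (totals : List Int) (adapters : List Int) (out : Int) : Decidable (Spec_compute_combinations totals adapters out) := by unfold Spec_compute_combinations; infer_instance

-- ===== CLAIM (what is proved, stated in full; the proofs are below) =====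
def Claim_equal_compute_combinations : Prop := ∀ (totals : List Int) (adapters : List Int), Dom_compute_combinations totals adapters → Pre_compute_combinations totals adapters → Spec_compute_combinations totals adapters (compute_combinations totals adapters)

-- ===== LEMMAS AND PROOFS =====

-- the value A's inner j-loop leaves at key i (membership tested in ys, as A does)
def fA (ys : List Int) (i : Int) : Int :=
  (((-1 : Int) + (if ys.contains (i + 1) then 1 else 0))
      + (if ys.contains (i + 2) then 1 else 0))
    + (if ys.contains (i + 3) then 1 else 0)

-- the per-index value of B's sweep (what v is at index t, started canonically from t)
def pvV (K : List Int) (t : Nat) : Int :=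
  if t = K.length - 1 then 0 else (pvAdvance K (K.getD t 0 + 3) t : Int) - (t : Int) - 1

lemma inner_step (ys : List Int) (d : PySem.Dict Int Int) (i : Int) :
    (PySem.List.pyRange 1 4 1).foldl
      (fun diffs j =>
        if ys.contains (i + j) then diffs.insert i (diffs.getD i 0 + 1) else diffs)
      (d.insert i (-1))
    = d.insert i (fA ys i) := by
  have h3 : PySem.List.pyRange 1 4 1 = [1, 2, 3] := rfl
  rw [h3]
  simp only [List.foldl]
  unfold fA
  by_cases h1 : i + 1 ∈ ys <;>
    by_cases h2 : i + 2 ∈ ys <;>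
      by_cases hx : i + 3 ∈ ys <;>
        simp [h1, h2, hx, PySem.Dict.getD_insert_self, PySem.Dict.insert_insert_self]

lemma keys_foldl_insert_simple (l : List Int) (v : Int → Int) :
    (l.foldl (fun d i => d.insert i (v i)) (PySem.Dict.empty : PySem.Dict Int Int)).keys
    = PySem.Set.ofList l := by
  rw [PySem.Dict.keys_foldl_insert]
  simp [PySem.Set.update_nil_left]

lemma foldl_insert_items (l : List Int) (v : Int → Int) :
    ((l.foldl (fun d i => d.insert i (v i)) (PySem.Dict.empty : PySem.Dict Int Int)).items)
    = (PySem.Set.ofList l).map (fun i => (i, v i)) := by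
  induction l using List.reverseRecOn with
  | nil => rfl
  | append_singleton xs x ih =>
    rw [List.foldl_append]
    simp only [List.foldl]
    by_cases hx : x ∈ xs
    · have hc : (xs.foldl (fun d i => d.insert i (v i)) PySem.Dict.empty).contains x = true := by
        rw [PySem.Dict.contains_iff_mem_keys, keys_foldl_insert_simple]
        exact (PySem.Set.mem_ofList xs x).2 hx
      rw [PySem.Dict.items_insert_of_contains _ _ hc, ih, List.map_map,
        PySem.Set.ofList_append_singleton,
        PySem.Set.add_of_mem ((PySem.Set.mem_ofList xs x).2 hx)]
      apply List.map_congr_left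
      intro i _
      by_cases hix : i = x
      · subst hix; simp
      · simp [Function.comp, hix]
    · have hc : (xs.foldl (fun d i => d.insert i (v i)) PySem.Dict.empty).contains x = false := by
        rw [← Bool.not_eq_true, PySem.Dict.contains_iff_mem_keys, keys_foldl_insert_simple]
        simp [PySem.Set.mem_ofList, hx]
      rw [PySem.Dict.items_insert_of_not_contains _ _ hc, ih,
        PySem.Set.ofList_append_singleton,
        PySem.Set.add_of_not_mem (fun hmem => hx ((PySem.Set.mem_ofList xs x).1 hmem)),
        List.map_append]
      rfl

lemma diffs_items (ys : List Int) (h : ys ≠ []) :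
    (compute_diffs ys).items
    = (PySem.Set.ofList ys).map
        (fun i => (i, if i = ys.getLast h then 0 else fA ys i)) := by
  unfold compute_diffs
  simp only [PySem.List.slice_to_neg_one, inner_step]
  rw [PySem.List.pyGetD_neg_one ys 0 h]
  by_cases hmem : ys.getLast h ∈ ys.dropLast
  · have hc : ((ys.dropLast.foldl (fun d i => d.insert i (fA ys i)) PySem.Dict.empty)).contains (ys.getLast h) = true := by
      rw [PySem.Dict.contains_iff_mem_keys, keys_foldl_insert_simple]
      exact (PySem.Set.mem_ofList _ _).2 hmem
    rw [PySem.Dict.items_insert_of_contains _ _ hc, foldl_insert_items, List.map_map]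
    have hofl : PySem.Set.ofList ys = PySem.Set.ofList ys.dropLast := by
      conv_lhs => rw [← List.dropLast_append_getLast h]
      rw [PySem.Set.ofList_append_singleton,
        PySem.Set.add_of_mem ((PySem.Set.mem_ofList _ _).2 hmem)]
    rw [hofl]
    apply List.map_congr_left
    intro i _
    by_cases hix : i = ys.getLast h
    · subst hix; simp
    · simp [Function.comp, hix]
  · have hc : ((ys.dropLast.foldl (fun d i => d.insert i (fA ys i)) PySem.Dict.empty)).contains (ys.getLast h) = false := by
      rw [← Bool.not_eq_true, PySem.Dict.contains_iff_mem_keys, keys_foldl_insert_simple]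
      simp only [PySem.Set.mem_ofList]
      exact hmem
    rw [PySem.Dict.items_insert_of_not_contains _ _ hc, foldl_insert_items]
    have hofl : PySem.Set.ofList ys = PySem.Set.ofList ys.dropLast ++ [ys.getLast h] := by
      conv_lhs => rw [← List.dropLast_append_getLast h]
      rw [PySem.Set.ofList_append_singleton,
        PySem.Set.add_of_not_mem (fun hm => hmem ((PySem.Set.mem_ofList _ _).1 hm))]
    rw [hofl, List.map_append]
    congr 1
    · apply List.map_congr_left
      intro i hi
      have : i ≠ ys.getLast h := fun h0 => hmem (h0 ▸ (PySem.Set.mem_ofList _ _).1 hi)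
      simp [this]
    · simp

lemma ofList_sublist (xs : List Int) : (PySem.Set.ofList xs).Sublist xs := by
  induction xs using List.reverseRecOn with
  | nil => simp
  | append_singleton xs x ih =>
    rw [PySem.Set.ofList_append_singleton, PySem.Set.add_eq_ite]
    split_ifs with hx
    · exact ih.trans (List.sublist_append_left xs [x])
    · exact List.Sublist.append ih (List.Sublist.refl [x])

lemma le_getLast_of_pairwise (l : List Int) (hp : l.Pairwise (· ≤ ·)) (hne : l ≠ [])
    {x : Int} (hx : x ∈ l) : x ≤ l.getLast hne := by
  have hsplit := List.dropLast_append_getLast hne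
  rw [← hsplit] at hp hx
  rw [List.pairwise_append] at hp
  rcases List.mem_append.mp hx with h1 | h2
  · exact hp.2.2 x h1 _ (List.mem_singleton_self _)
  · rw [List.mem_singleton] at h2; exact le_of_eq h2

lemma combs_eq (n : Int) :
    (PySem.List.pyRange 0 (n + 1) 1).foldl (fun c i => c + (n.toNat.choose i.toNat : Int)) 0
    = if 0 ≤ n then (1 : Int) <<< n.toNat else 0 := by
  by_cases hn : 0 ≤ n
  · obtain ⟨m, rfl⟩ := Int.eq_ofNat_of_zero_le hn
    rw [if_pos hn]
    have e1 : ((m : Int) + 1) = ((m + 1 : Nat) : Int) := by push_cast; ring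
    rw [e1, PySem.List.pyRange_zero_nat, PySem.List.foldl_add, List.map_map]
    have e2 : (List.range (m+1)).map ((fun i : Int => ((m : Int).toNat.choose i.toNat : Int)) ∘ (fun k : Nat => (k : Int)))
        = (List.range (m+1)).map (fun k => (m.choose k : Int)) := by
      apply List.map_congr_left; intro k _; simp
    rw [e2]
    have e3 : ((List.range (m+1)).map (fun k => (m.choose k : Int))).sum
        = ∑ i ∈ Finset.range (m+1), ((m.choose i : Nat) : Int) := rfl
    have e4 : ∑ i ∈ Finset.range (m+1), ((m.choose i : Nat) : Int) = (((2:Nat)^m : Nat) : Int) := by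
      rw [← Nat.cast_sum, Nat.sum_range_choose]
    rw [e3, e4]
    simp [Int.shiftLeft_eq]
  · rw [if_neg hn, PySem.List.pyRange_one_eq_nil (by omega)]
    rfl

-- the values list of A's dict, as a map over the distinct sorted keys
lemma vals_map (ys : List Int) (h : ys ≠ []) :
    (compute_diffs ys).values
    = (PySem.Set.ofList ys).map (fun i => if i = ys.getLast h then 0 else fA ys i) := by
  show ((compute_diffs ys).items).map (fun p => p.2) = _
  rw [diffs_items ys h, List.map_map]
  rfl

-- B-side: the dedup of a ≤-sorted list is exactly set(xs) in first-occurrence order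
lemma pvDedup_eq_ofList (xs : List Int) (h : xs.Pairwise (· ≤ ·)) :
    pvDedup xs = PySem.Set.ofList xs := by
  induction xs using List.reverseRecOn with
  | nil => rfl
  | append_singleton xs x ih =>
    have hx : xs.Pairwise (· ≤ ·) ∧ ∀ y ∈ xs, y ≤ x := by
      rw [List.pairwise_append] at h
      exact ⟨h.1, fun y hy => h.2.2 y hy x (List.mem_singleton_self x)⟩
    have ihx := ih hx.1
    unfold pvDedup at ihx ⊢
    rw [List.foldl_append, ihx]
    simp only [List.foldl]
    rw [PySem.Set.ofList_append_singleton]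
    by_cases hm : x ∈ PySem.Set.ofList xs
    · have hne : PySem.Set.ofList xs ≠ [] := by
        intro h0; rw [h0] at hm; simp at hm
      have hglx : (PySem.Set.ofList xs).getLast hne = x := by
        apply le_antisymm
        · exact hx.2 _ (List.Sublist.mem (List.getLast_mem hne) (ofList_sublist xs))
        · exact le_getLast_of_pairwise _ ((hx.1).sublist (ofList_sublist xs)) hne hm
      have hsome : (PySem.Set.ofList xs).getLast? = some x := by
        rw [List.getLast?_eq_some_getLast (h := hne), hglx]
      rw [hsome, if_pos rfl, PySem.Set.add_of_mem hm]
    · have hgl : ¬ ((PySem.Set.ofList xs).getLast? = some x) := by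
        intro h0
        exact hm (List.mem_of_getLast? h0)
      rw [if_neg hgl, PySem.Set.add_of_not_mem hm]

-- strict monotonicity of getD on a strictly sorted list
lemma getD_lt_of_lt (K : List Int) (hlt : K.Pairwise (· < ·)) (t s : Nat)
    (hs : s < K.length) (hts : t < s) : K.getD t 0 < K.getD s 0 := by
  rw [List.getD_eq_getElem K 0 (by omega), List.getD_eq_getElem K 0 hs]
  exact List.pairwise_iff_getElem.mp hlt t s (by omega) hs hts

lemma getD_le_of_le (K : List Int) (hlt : K.Pairwise (· < ·)) (t s : Nat)
    (hs : s < K.length) (hts : t ≤ s) : K.getD t 0 ≤ K.getD s 0 := by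
  rcases Nat.lt_or_ge t s with h | h
  · exact le_of_lt (getD_lt_of_lt K hlt t s hs h)
  · have : t = s := by omega
    rw [this]

-- pvAdvance reaches the last index whose key is ≤ bnd
lemma pvAdvance_spec_fuel (keys : List Int) (bnd : Int) :
    ∀ fuel j, keys.length ≤ j + fuel → j < keys.length → keys.getD j 0 ≤ bnd →
      j ≤ pvAdvance keys bnd j ∧ pvAdvance keys bnd j < keys.length ∧
      keys.getD (pvAdvance keys bnd j) 0 ≤ bnd ∧
      (pvAdvance keys bnd j + 1 < keys.length → bnd < keys.getD (pvAdvance keys bnd j + 1) 0) := by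
  intro fuel
  induction fuel with
  | zero => intro j h1 h2 _; omega
  | succ n ih =>
    intro j h1 h2 h3
    rw [pvAdvance]
    split_ifs with hc
    · have := ih (j + 1) (by omega) hc.1 hc.2
      exact ⟨by omega, this.2.1, this.2.2.1, this.2.2.2⟩
    · refine ⟨le_refl j, h2, h3, fun hj1 => ?_⟩
      rcases not_and_or.mp hc with h | h
      · omega
      · omega

lemma pvAdvance_spec (keys : List Int) (bnd : Int) (j : Nat)
    (h2 : j < keys.length) (h3 : keys.getD j 0 ≤ bnd) :
    j ≤ pvAdvance keys bnd j ∧ pvAdvance keys bnd j < keys.length ∧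
    keys.getD (pvAdvance keys bnd j) 0 ≤ bnd ∧
    (pvAdvance keys bnd j + 1 < keys.length → bnd < keys.getD (pvAdvance keys bnd j + 1) 0) :=
  pvAdvance_spec_fuel keys bnd keys.length j (by omega) h2 h3

-- the reached index is unique (strictly sorted list)
lemma stop_unique (K : List Int) (hlt : K.Pairwise (· < ·)) (bnd : Int) (r1 r2 : Nat)
    (p1 : r1 < K.length ∧ K.getD r1 0 ≤ bnd ∧ (r1 + 1 < K.length → bnd < K.getD (r1 + 1) 0))
    (p2 : r2 < K.length ∧ K.getD r2 0 ≤ bnd ∧ (r2 + 1 < K.length → bnd < K.getD (r2 + 1) 0)) :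
    r1 = r2 := by
  rcases Nat.lt_trichotomy r1 r2 with h | h | h
  · exfalso
    have hx := p1.2.2 (by omega)
    have hy := getD_le_of_le K hlt (r1 + 1) r2 p2.1 (by omega)
    have := p2.2.1
    omega
  · exact h
  · exfalso
    have hx := p2.2.2 (by omega)
    have hy := getD_le_of_le K hlt (r2 + 1) r1 p1.1 (by omega)
    have := p1.2.1
    omega

-- counting a filter positionally
lemma filter_len_range (l : List Int) (p : Int → Bool) :
    (l.filter p).length = ((List.range l.length).filter (fun t => p (l.getD t 0))).length := by
  induction l using List.reverseRecOn with
  | nil => rfl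
  | append_singleton xs x ih =>
    have hr : List.range (xs ++ [x]).length = List.range xs.length ++ [xs.length] := by
      simp [List.range_succ]
    rw [List.filter_append, List.length_append, hr, List.filter_append, List.length_append]
    have e1 : (List.range xs.length).filter (fun t => p ((xs ++ [x]).getD t 0))
        = (List.range xs.length).filter (fun t => p (xs.getD t 0)) := by
      apply List.filter_congr
      intro t ht
      rw [List.mem_range] at ht
      rw [List.getD_append _ _ _ _ ht]
    have e2 : (xs ++ [x]).getD xs.length 0 = x := by
      rw [List.getD_eq_getElem _ 0 (by simp)]
      simp
    rw [e1, ih]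
    simp only [List.filter_singleton, e2]
    cases p x <;> rfl

lemma range_filter_interval (i r : Nat) (n : Nat) :
    ((List.range n).filter (fun t => decide (i < t ∧ t ≤ r))).length
    = min n (r + 1) - min n (i + 1) := by
  induction n with
  | zero => simp
  | succ n ih =>
    rw [List.range_succ, List.filter_append, List.length_append, ih]
    by_cases hc : i < n ∧ n ≤ r <;> simp [hc] <;> omega

-- the window filter counts the three offset memberships (any list)
lemma filt3 (k : Int) : ∀ K : List Int,
    (K.filter (fun x => decide (k < x ∧ x ≤ k + 3))).length
    = K.count (k + 1) + K.count (k + 2) + K.count (k + 3)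
  | [] => by simp
  | a :: t => by
    have ih := filt3 k t
    simp only [List.filter_cons, List.count_cons, beq_iff_eq]
    split_ifs <;>
      simp only [decide_eq_true_eq, List.length_cons] at * <;> omega

-- membership-indicator sum = window size, on a nodup list
lemma window_count (K : List Int) (h : K.Nodup) (k : Int) :
    ((K.filter (fun x => decide (k < x ∧ x ≤ k + 3))).length : Int)
    = (if (k + 1) ∈ K then (1 : Int) else 0) + (if (k + 2) ∈ K then 1 else 0)
      + (if (k + 3) ∈ K then 1 else 0) := by
  have hc : ∀ c : Int, (K.count c : Int) = if c ∈ K then (1 : Int) else 0 := by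
    intro c
    by_cases hm : c ∈ K
    · rw [if_pos hm, List.count_eq_one_of_mem h hm]; rfl
    · rw [if_neg hm, List.count_eq_zero_of_not_mem hm]; rfl
  rw [filt3]
  push_cast
  rw [hc, hc, hc]

-- A's per-key value equals B's two-pointer value, on the distinct sorted keys
lemma fA_eq_advance (ys : List Int) (hys : ys.Pairwise (· ≤ ·)) (i : Nat)
    (hi : i + 1 < (PySem.Set.ofList ys).length) :
    fA ys ((PySem.Set.ofList ys).getD i 0)
    = (pvAdvance (PySem.Set.ofList ys) ((PySem.Set.ofList ys).getD i 0 + 3) i : Int)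
      - (i : Int) - 1 := by
  set K := PySem.Set.ofList ys with hK
  have hnodup : K.Nodup := PySem.Set.nodup_ofList ys
  have hKsub : K.Sublist ys := ofList_sublist ys
  have hlt : K.Pairwise (· < ·) :=
    ((hys.sublist hKsub).and hnodup).imp (fun hab => lt_of_le_of_ne hab.1 hab.2)
  set k := K.getD i 0 with hk
  set r := pvAdvance K (k + 3) i with hr
  have him : i < K.length := by omega
  have hspec := pvAdvance_spec K (k + 3) i him (by omega)
  rw [← hr] at hspec
  have hmemKys : ∀ c : Int, c ∈ K ↔ c ∈ ys := fun c => PySem.Set.mem_ofList ys c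
  have hcont : ∀ c : Int, ys.contains c = decide (c ∈ K) := by
    intro c
    by_cases hm : c ∈ K
    · simp [hm, (hmemKys c).1 hm]
    · have : c ∉ ys := fun hy => hm ((hmemKys c).2 hy)
      simp [hm, this]
  have e1 : fA ys k
      = -1 + (((if (k + 1) ∈ K then (1 : Int) else 0) + (if (k + 2) ∈ K then 1 else 0)
          + (if (k + 3) ∈ K then 1 else 0))) := by
    unfold fA
    rw [hcont, hcont, hcont]
    by_cases m1 : (k + 1) ∈ K <;> by_cases m2 : (k + 2) ∈ K <;> by_cases m3 : (k + 3) ∈ K <;>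
      · simp [m1, m2, m3]
        try ring
  rw [e1, ← window_count K hnodup k]
  have e2 : (K.filter (fun x => decide (k < x ∧ x ≤ k + 3))).length
      = ((List.range K.length).filter (fun t => decide (i < t ∧ t ≤ r))).length := by
    rw [filter_len_range]
    congr 1
    apply List.filter_congr
    intro t ht
    rw [List.mem_range] at ht
    simp only [decide_eq_decide]
    constructor
    · rintro ⟨ha, hb⟩
      constructor
      · by_contra hle
        have : K.getD t 0 ≤ k := getD_le_of_le K hlt t i him (by omega)
        omega
      · by_contra hgt
        have h1 : r + 1 ≤ t := by omega
        have h2 : (k + 3) < K.getD (r + 1) 0 := hspec.2.2.2 (by omega)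
        have h3 : K.getD (r + 1) 0 ≤ K.getD t 0 := getD_le_of_le K hlt (r + 1) t ht h1
        omega
    · rintro ⟨ha, hb⟩
      constructor
      · exact getD_lt_of_lt K hlt i t ht ha
      · have := getD_le_of_le K hlt t r hspec.2.1 hb
        have := hspec.2.2.1
        omega
  rw [e2, range_filter_interval]
  have h1 : i ≤ r := hspec.1
  have h2 : r < K.length := hspec.2.1
  have : min K.length (r + 1) - min K.length (i + 1) = r - i := by omega
  rw [this]
  omega

-- A's two_diffs loop as a sum over pattern terms
lemma A_fold_sum (V : List Int) :
    (PySem.List.pyRange 0 ((V.length : Int) - 1) 1).foldl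
      (fun two_diffs i =>
        (two_diffs + (if PySem.List.pyGetD V i 0 = 2 then 1 else 0))
          + (if PySem.List.pyGetD V i 0 = 1 ∧ PySem.List.pyGetD V (i + 1) 0 = 1 then 1 else 0))
      0
    = ((List.range (V.length - 1)).map
        (fun t => (if V.getD t 0 = 2 then (1 : Int) else 0)
          + (if V.getD t 0 = 1 ∧ V.getD (t + 1) 0 = 1 then 1 else 0))).sum := by
  have hstep : (fun (a : Int) (i : Int) =>
        (a + (if PySem.List.pyGetD V i 0 = 2 then 1 else 0))
          + (if PySem.List.pyGetD V i 0 = 1 ∧ PySem.List.pyGetD V (i + 1) 0 = 1 then 1 else 0))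
      = fun (a : Int) (i : Int) => a + ((if PySem.List.pyGetD V i 0 = 2 then (1 : Int) else 0)
          + (if PySem.List.pyGetD V i 0 = 1 ∧ PySem.List.pyGetD V (i + 1) 0 = 1 then (1 : Int) else 0)) := by
    funext a i; ring
  rw [hstep]
  rcases V with _ | ⟨x, t⟩
  · rfl
  · have hlen : ((x :: t).length : Int) - 1 = (((x :: t).length - 1 : Nat) : Int) := by
      rw [List.length_cons]; omega
    rw [hlen, PySem.List.pyRange_zero_nat, PySem.List.foldl_add, List.map_map]
    have e : (List.range ((x :: t).length - 1)).map
          ((fun i : Int => (if PySem.List.pyGetD (x :: t) i 0 = 2 then (1 : Int) else 0)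
            + (if PySem.List.pyGetD (x :: t) i 0 = 1 ∧ PySem.List.pyGetD (x :: t) (i + 1) 0 = 1 then (1 : Int) else 0)) ∘ (fun k : Nat => (k : Int)))
        = (List.range ((x :: t).length - 1)).map
          (fun k => (if (x :: t).getD k 0 = 2 then (1 : Int) else 0)
            + (if (x :: t).getD k 0 = 1 ∧ (x :: t).getD (k + 1) 0 = 1 then (1 : Int) else 0)) := by
      apply List.map_congr_left; intro k _
      have hk1 : ((k : Int) + 1) = ((k + 1 : Nat) : Int) := by push_cast; ring
      simp only [Function.comp_apply, hk1, PySem.List.pyGetD_natCast]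
    rw [e]
    ring

-- B's fused sweep computes the same pattern sum (invariant: the carried pointer stays valid)
lemma B_fold (K : List Int) (hlt : K.Pairwise (· < ·)) :
    ∀ n, 1 ≤ n → n ≤ K.length →
    ∃ j : Nat,
      (List.range n).foldl
        (fun st i =>
          let jv : Nat × Int :=
            if i = K.length - 1 then (st.2.2, 0)
            else
              let j := pvAdvance K (K.getD i 0 + 3) st.2.2
              (j, (j : Int) - (i : Int) - 1)
          (if 0 < i then
              st.1 + (if st.2.1 = 2 then 1 else 0) + (if st.2.1 = 1 ∧ jv.2 = 1 then 1 else 0)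
            else st.1,
           jv.2, jv.1))
        ((0 : Int), (0 : Int), (0 : Nat))
      = (((List.range (n - 1)).map
            (fun t => (if pvV K t = 2 then (1 : Int) else 0)
              + (if pvV K t = 1 ∧ pvV K (t + 1) = 1 then 1 else 0))).sum,
         pvV K (n - 1), j)
      ∧ (n < K.length → j < K.length ∧ K.getD j 0 ≤ K.getD n 0 + 3) := by
  intro n h1
  induction n, h1 using Nat.le_induction with
  | base =>
    intro hm
    simp only [List.range_one, List.foldl_cons, List.foldl_nil]
    by_cases h1 : K.length = 1
    · refine ⟨0, ?_, ?_⟩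
      · rw [if_pos (show (0 : Nat) = K.length - 1 by omega)]
        simp [pvV, h1]
      · intro h; omega
    · have hne : (0 : Nat) ≠ K.length - 1 := by omega
      have hspec := pvAdvance_spec K (K.getD 0 0 + 3) 0 (by omega) (by omega)
      refine ⟨pvAdvance K (K.getD 0 0 + 3) 0, ?_, ?_⟩
      · rw [if_neg hne]
        simp [pvV, hne]
      · intro h
        refine ⟨hspec.2.1, ?_⟩
        have h03 : K.getD 0 0 ≤ K.getD 1 0 := getD_le_of_le K hlt 0 1 h (by omega)
        have := hspec.2.2.1
        omega
  | succ n hn ih =>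
    intro hm
    obtain ⟨j, hfold, hinv⟩ := ih (by omega)
    rw [List.range_succ, List.foldl_append, hfold]
    simp only [List.foldl_cons, List.foldl_nil]
    have hrange : List.range n = List.range (n - 1) ++ [n - 1] := by
      rw [← List.range_succ]; congr 1; omega
    have hsum : ((List.range n).map
          (fun t => (if pvV K t = 2 then (1 : Int) else 0)
            + (if pvV K t = 1 ∧ pvV K (t + 1) = 1 then 1 else 0))).sum
        = ((List.range (n - 1)).map
            (fun t => (if pvV K t = 2 then (1 : Int) else 0)
              + (if pvV K t = 1 ∧ pvV K (t + 1) = 1 then 1 else 0))).sum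
          + ((if pvV K (n - 1) = 2 then (1 : Int) else 0)
            + (if pvV K (n - 1) = 1 ∧ pvV K n = 1 then 1 else 0)) := by
      rw [hrange, List.map_append, List.sum_append]
      have : n - 1 + 1 = n := by omega
      simp [this]
    by_cases hlast : n = K.length - 1
    · refine ⟨j, ?_, ?_⟩
      · rw [if_pos hlast, if_pos (show 0 < n by omega)]
        have hv : pvV K n = 0 := by rw [pvV, if_pos hlast]
        simp only [Nat.add_sub_cancel]
        rw [hsum, hv]
        simp [add_assoc]
      · intro h; omega
    · have hj := hinv (by omega)
      have hspecj := pvAdvance_spec K (K.getD n 0 + 3) j hj.1 hj.2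
      have hspecn := pvAdvance_spec K (K.getD n 0 + 3) n (by omega) (by omega)
      have hjn : pvAdvance K (K.getD n 0 + 3) j = pvAdvance K (K.getD n 0 + 3) n :=
        stop_unique K hlt (K.getD n 0 + 3) _ _
          ⟨hspecj.2.1, hspecj.2.2.1, hspecj.2.2.2⟩
          ⟨hspecn.2.1, hspecn.2.2.1, hspecn.2.2.2⟩
      have hv : pvV K n = (pvAdvance K (K.getD n 0 + 3) n : Int) - (n : Int) - 1 := by
        rw [pvV, if_neg hlast]
      refine ⟨pvAdvance K (K.getD n 0 + 3) j, ?_, ?_⟩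
      · rw [if_neg hlast, if_pos (show 0 < n by omega)]
        simp only [hjn, Nat.add_sub_cancel]
        rw [hsum, ← hv]
        simp [add_assoc]
      · intro h
        rw [hjn]
        refine ⟨hspecn.2.1, ?_⟩
        have h1 : K.getD n 0 ≤ K.getD (n + 1) 0 := getD_le_of_le K hlt n (n + 1) h (by omega)
        have := hspecn.2.2.1
        omega

-- ===== VERDICT (by name: the statement is the Claim_ definition above) =====
theorem compute_combinations_spec : Claim_equal_compute_combinations := by
  intro totals adapters _ hpre
  obtain ⟨hlen, hne⟩ := hpre
  unfold Spec_compute_combinations compute_combinations compute_combinations_alt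
  simp only []
  set ys := PySem.List.sorted adapters (fun x => x) with hysdef
  have hys : ys.Pairwise (· ≤ ·) := PySem.List.sorted_pairwise adapters (fun x => x)
  have hperm : ys.Perm adapters := PySem.List.sorted_perm adapters (fun x => x) false
  have hysne : ys ≠ [] := by
    intro h0
    exact hne (List.Perm.eq_nil (h0 ▸ hperm.symm))
  set K := PySem.Set.ofList ys with hKdef
  have hKnodup : K.Nodup := PySem.Set.nodup_ofList ys
  have hKsub : K.Sublist ys := ofList_sublist ys
  have hKpar : K.Pairwise (· ≤ ·) := hys.sublist hKsub
  have hKlt : K.Pairwise (· < ·) :=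
    (hKpar.and hKnodup).imp (fun hab => lt_of_le_of_ne hab.1 hab.2)
  have hKne : K ≠ [] := by
    cases hy : ys with
    | nil => exact absurd hy hysne
    | cons a t =>
      intro h0
      have ha : a ∈ K := (PySem.Set.mem_ofList _ _).2 (hy ▸ (List.mem_cons_self : a ∈ a :: t))
      rw [h0] at ha
      simp at ha
  have hm1 : 1 ≤ K.length := List.length_pos_iff.mpr hKne
  have hlast : K.getLast hKne = ys.getLast hysne := by
    apply le_antisymm
    · exact le_getLast_of_pairwise ys hys hysne
        (List.Sublist.mem (List.getLast_mem hKne) hKsub)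
    · exact le_getLast_of_pairwise K hKpar hKne
        ((PySem.Set.mem_ofList _ _).2 (List.getLast_mem hysne))
  rw [combs_eq, pvDedup_eq_ofList ys hys, vals_map ys hysne]
  congr 1
  -- both diff-pattern counts equal the sum over pvV-pattern terms
  set g : Int → Int := fun i => if i = ys.getLast hysne then 0 else fA ys i with hgdef
  have hVlen : (K.map g).length = K.length := List.length_map g
  -- A's vals agree with pvV positionally
  have hAgree : ∀ t, t < K.length → (K.map g).getD t 0 = pvV K t := by
    intro t ht
    have hget : (K.map g).getD t 0 = g (K.getD t 0) := by
      rw [List.getD_eq_getElem _ 0 (by rw [hVlen]; exact ht), List.getD_eq_getElem K 0 ht]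
      simp
    rw [hget]
    by_cases hl : t = K.length - 1
    · have hKl : K.getD t 0 = ys.getLast hysne := by
        rw [hl, ← hlast, List.getLast_eq_getElem, List.getD_eq_getElem K 0 (by omega)]
      rw [hgdef]
      simp only []
      rw [hKl, if_pos rfl, pvV, if_pos hl]
    · have hne2 : K.getD t 0 ≠ ys.getLast hysne := by
        intro h0
        have hb1 : K.length - 1 < K.length := by omega
        have hb2 : t < K.length - 1 := by omega
        have hlt2 : K.getD t 0 < K.getD (K.length - 1) 0 :=
          getD_lt_of_lt K hKlt t (K.length - 1) hb1 hb2
        have hgl : K.getD (K.length - 1) 0 = ys.getLast hysne := by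
          rw [← hlast, List.getLast_eq_getElem, List.getD_eq_getElem K 0 hb1]
        rw [h0, hgl] at hlt2
        exact lt_irrefl _ hlt2
      rw [hgdef]
      simp only [if_neg hne2]
      rw [pvV, if_neg hl]
      exact fA_eq_advance ys hys t
        (by have hK' : (PySem.Set.ofList ys).length = K.length := rfl; omega)
  obtain ⟨j, hfold, _⟩ := B_fold K hKlt K.length hm1 (le_refl _)
  rw [hfold, A_fold_sum, hVlen]
  simp only []
  apply congrArg List.sum
  apply List.map_congr_left
  intro t ht
  rw [List.mem_range] at ht
  rw [hAgree t (by omega), hAgree (t + 1) (by omega)]
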